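-- pv_equiv track=rewrite | github.com/chechere10/Ramirez | backend/app/services/pdf_highlighter.py | _son_similares_ocr
-- ===== SOURCE A (Python) =====
-- def _son_similares_ocr(c1: str, c2: str) -> bool:
--     """Verifica si dos caracteres son confusiones comunes de OCR."""
--     c1, c2 = c1.upper(), c2.upper()
--
--     # Grupos de caracteres que el OCR confunde frecuentemente
--     grupos_confusion = [
--         {'0', 'O', 'Q', 'D', 'C', '°'},
--         {'1', 'I', 'L', '|', '!'},
--         {'5', 'S', '$', '£'},
--         {'6', 'G', '€', 'É', 'E', 'B'},
--         {'8', 'B', '&'},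
--         {'2', 'Z'},
--         {'9', 'G', 'Q'},
--     ]
--
--     for grupo in grupos_confusion:
--         if c1 in grupo and c2 in grupo:
--             return True
--     return False
-- ===== SOURCE B (Python) =====
-- # B: precomputed bitmask table; two chars are OCR-similar iff their group masks share a bit.
-- # bit i of a char's mask = membership in confusion group i (groups 0..6 as in A).
-- _MASK = {
--     '0': 1, 'O': 1, 'D': 1, 'C': 1, '\u00b0': 1,
--     '1': 2, 'I': 2, 'L': 2, '|': 2, '!': 2,
--     '5': 4, 'S': 4, '$': 4, '\u00a3': 4,
--     '6': 8, '\u20ac': 8, '\u00c9': 8, 'E': 8,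
--     '8': 16, '&': 16,
--     '2': 32, 'Z': 32,
--     '9': 64,
--     'Q': 65,   # groups 0 and 6
--     'G': 72,   # groups 3 and 6
--     'B': 24,   # groups 3 and 4
-- }
--
--
-- def _son_similares_ocr(c1: str, c2: str) -> bool:
--     return bool(_MASK.get(c1.upper(), 0) & _MASK.get(c2.upper(), 0))
-- ===== Notes on version B (the rewrite author's own statement) =====
-- stated objective: alternative
-- what changed: Replaces A's per-call scan over the seven confusion groups with a precomputed flat table mapping each character to a 7-bit group-membership bitmask; the answer is a single bitwise AND of two table lookups being non-zero.
import Mathlib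
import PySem

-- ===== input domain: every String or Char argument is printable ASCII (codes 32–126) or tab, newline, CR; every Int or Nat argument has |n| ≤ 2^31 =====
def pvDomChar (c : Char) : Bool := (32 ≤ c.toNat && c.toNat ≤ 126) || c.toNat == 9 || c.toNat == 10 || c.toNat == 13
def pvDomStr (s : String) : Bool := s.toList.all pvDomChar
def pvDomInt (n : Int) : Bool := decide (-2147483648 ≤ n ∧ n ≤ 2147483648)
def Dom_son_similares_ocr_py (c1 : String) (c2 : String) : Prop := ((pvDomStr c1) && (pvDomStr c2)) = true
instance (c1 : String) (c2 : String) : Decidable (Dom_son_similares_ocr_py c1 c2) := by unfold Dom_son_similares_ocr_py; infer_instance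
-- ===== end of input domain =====

-- B replaces A's per-call scan of all seven confusion groups by a precomputed flat table
-- mapping each character to a 7-bit group-membership bitmask; the answer is one bitwise AND
-- of two lookups being non-zero (objective: alternative).

-- ===== PORT A =====
-- the seven confusion groups (Python set literals, membership only)
def grupos_confusion : List (PySem.Set String) :=
  [PySem.Set.ofList ["0", "O", "Q", "D", "C", "°"],
   PySem.Set.ofList ["1", "I", "L", "|", "!"],
   PySem.Set.ofList ["5", "S", "$", "£"],
   PySem.Set.ofList ["6", "G", "€", "É", "E", "B"],
   PySem.Set.ofList ["8", "B", "&"],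
   PySem.Set.ofList ["2", "Z"],
   PySem.Set.ofList ["9", "G", "Q"]]

-- the 'for grupo in grupos_confusion: if c1 in grupo and c2 in grupo: return True' loop
def sonSimilaresLoop (u1 u2 : String) : List (PySem.Set String) → Bool
  | [] => false
  | grupo :: rest =>
      if PySem.Set.contains grupo u1 && PySem.Set.contains grupo u2 then true
      else sonSimilaresLoop u1 u2 rest

def son_similares_ocr_py (c1 : String) (c2 : String) : Bool :=
  let u1 := PySem.Str.upper c1
  let u2 := PySem.Str.upper c2
  sonSimilaresLoop u1 u2 grupos_confusion

-- ===== PORT B =====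
-- _MASK: precomputed bitmask table (bit i = membership in confusion group i)
def ocrMask : PySem.Dict String Int :=
  PySem.Dict.ofList
    [("0", 1), ("O", 1), ("D", 1), ("C", 1), ("°", 1),
     ("1", 2), ("I", 2), ("L", 2), ("|", 2), ("!", 2),
     ("5", 4), ("S", 4), ("$", 4), ("£", 4),
     ("6", 8), ("€", 8), ("É", 8), ("E", 8),
     ("8", 16), ("&", 16),
     ("2", 32), ("Z", 32),
     ("9", 64),
     ("Q", 65), ("G", 72), ("B", 24)]

-- return bool(_MASK.get(c1.upper(), 0) & _MASK.get(c2.upper(), 0))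
def son_similares_ocr_py_alt (c1 : String) (c2 : String) : Bool :=
  decide (PySem.Int.band (ocrMask.getD (PySem.Str.upper c1) 0)
                         (ocrMask.getD (PySem.Str.upper c2) 0) ≠ 0)

-- ===== PRECONDITION & SPEC =====
def Spec_son_similares_ocr_py (c1 : String) (c2 : String) (out : Bool) : Prop := out = son_similares_ocr_py_alt c1 c2
instance (c1 : String) (c2 : String) (out : Bool) : Decidable (Spec_son_similares_ocr_py c1 c2 out) := by unfold Spec_son_similares_ocr_py; infer_instance

-- ===== CLAIM =====
def Claim_equal_son_similares_ocr_py : Prop := ∀ (c1 : String) (c2 : String), Dom_son_similares_ocr_py c1 c2 → Spec_son_similares_ocr_py c1 c2 (son_similares_ocr_py c1 c2)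

-- ===== LEMMAS AND PROOFS =====
-- every character occurring in any group (= the keys of ocrMask)
def pvAllKeys : List String :=
  ["0", "O", "D", "C", "°", "1", "I", "L", "|", "!", "5", "S", "$", "£",
   "6", "€", "É", "E", "8", "&", "2", "Z", "9", "Q", "G", "B"]

lemma keys_ocrMask : ocrMask.keys = pvAllKeys := by decide

lemma mem_grupos_sub : ∀ g ∈ grupos_confusion, ∀ x ∈ g, x ∈ pvAllKeys := by decide

lemma contains_false_of_notkey (u : String) (h : u ∉ pvAllKeys) :
    ∀ g ∈ grupos_confusion, PySem.Set.contains g u = false := by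
  intro g hg
  cases hc : PySem.Set.contains g u with
  | false => rfl
  | true => exact absurd (mem_grupos_sub g hg u ((PySem.Set.contains_iff g u).1 hc)) h

lemma loop_false_left (u1 u2 : String) (gs : List (PySem.Set String))
    (h : ∀ g ∈ gs, PySem.Set.contains g u1 = false) : sonSimilaresLoop u1 u2 gs = false := by
  induction gs with
  | nil => rfl
  | cons g rest ih =>
      have hni : u1 ∉ g := fun hm => by
        have hc := (PySem.Set.contains_iff g u1).2 hm
        rw [h g (by simp)] at hc
        exact Bool.false_ne_true hc
      simp [sonSimilaresLoop, hni, ih (fun g hg => h g (List.mem_cons_of_mem _ hg))]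

lemma loop_false_right (u1 u2 : String) (gs : List (PySem.Set String))
    (h : ∀ g ∈ gs, PySem.Set.contains g u2 = false) : sonSimilaresLoop u1 u2 gs = false := by
  induction gs with
  | nil => rfl
  | cons g rest ih =>
      have hni : u2 ∉ g := fun hm => by
        have hc := (PySem.Set.contains_iff g u2).2 hm
        rw [h g (by simp)] at hc
        exact Bool.false_ne_true hc
      simp [sonSimilaresLoop, hni, ih (fun g hg => h g (List.mem_cons_of_mem _ hg))]

lemma getD_zero_of_notkey (u : String) (h : u ∉ pvAllKeys) :
    ocrMask.getD u 0 = 0 :=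
  PySem.Dict.getD_of_not_contains _ _
    (by rw [PySem.Dict.contains_eq_decide_mem_keys, keys_ocrMask]; exact decide_eq_false h)

lemma core_eq (u1 u2 : String) :
    sonSimilaresLoop u1 u2 grupos_confusion
      = decide (PySem.Int.band (ocrMask.getD u1 0) (ocrMask.getD u2 0) ≠ 0) := by
  by_cases h1 : u1 ∈ pvAllKeys
  · by_cases h2 : u2 ∈ pvAllKeys
    · simp only [pvAllKeys, List.mem_cons, List.not_mem_nil, or_false] at h1 h2
      rcases h1 with rfl|rfl|rfl|rfl|rfl|rfl|rfl|rfl|rfl|rfl|rfl|rfl|rfl|rfl|rfl|rfl|rfl|rfl|rfl|rfl|rfl|rfl|rfl|rfl|rfl|rfl <;> rcases h2 with rfl|rfl|rfl|rfl|rfl|rfl|rfl|rfl|rfl|rfl|rfl|rfl|rfl|rfl|rfl|rfl|rfl|rfl|rfl|rfl|rfl|rfl|rfl|rfl|rfl|rfl <;> decide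
    · rw [loop_false_right u1 u2 _ (contains_false_of_notkey u2 h2), getD_zero_of_notkey u2 h2]
      simp [PySem.Int.band_zero]
  · rw [loop_false_left u1 u2 _ (contains_false_of_notkey u1 h1), getD_zero_of_notkey u1 h1]
    rw [PySem.Int.band_comm]; simp [PySem.Int.band_zero]

-- ===== VERDICT =====
theorem son_similares_ocr_py_spec : Claim_equal_son_similares_ocr_py := by
  intro c1 c2 _
  show son_similares_ocr_py c1 c2 = son_similares_ocr_py_alt c1 c2
  exact core_eq (PySem.Str.upper c1) (PySem.Str.upper c2)
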